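-- pv_equiv track=rewrite | github.com/DsChauhan08/qalpha | strategy/meta_dual_blend_strategy.py | _feature_family_counts
-- ===== SOURCE A (Python) =====
-- def _feature_family_counts(feature_cols: list[str]) -> dict[str, int]:
--     mc_count = sum(1 for c in feature_cols if str(c).startswith(("mc_", "jd_", "rs_")))
--     pade_count = sum(1 for c in feature_cols if str(c).startswith("pade_"))
--     path_shape_count = sum(1 for c in feature_cols if str(c).startswith("ps_"))
--     return {
--         "feature_count": int(len(feature_cols)),
--         "mc_feature_count": int(mc_count),
--         "pade_feature_count": int(pade_count),
--         "path_shape_feature_count": int(path_shape_count),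
--     }
-- ===== SOURCE B (Python) =====
-- def _feature_family_counts(feature_cols: list[str]) -> dict[str, int]:
--     mc = pade = path = 0
--     for c in feature_cols:
--         s = str(c)
--         if s.startswith(("mc_", "jd_", "rs_")):
--             mc += 1
--         elif s.startswith("pade_"):
--             pade += 1
--         elif s.startswith("ps_"):
--             path += 1
--     return {
--         "feature_count": int(len(feature_cols)),
--         "mc_feature_count": int(mc),
--         "pade_feature_count": int(pade),
--         "path_shape_feature_count": int(path),
--     }
-- ===== Notes on version B (the rewrite author's own statement) =====
-- stated objective: simpler
-- what changed: Replaces three independent generator-expression scans of feature_cols by a single loop that classifies each name once into three disjoint-prefix counters.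
import Mathlib
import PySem

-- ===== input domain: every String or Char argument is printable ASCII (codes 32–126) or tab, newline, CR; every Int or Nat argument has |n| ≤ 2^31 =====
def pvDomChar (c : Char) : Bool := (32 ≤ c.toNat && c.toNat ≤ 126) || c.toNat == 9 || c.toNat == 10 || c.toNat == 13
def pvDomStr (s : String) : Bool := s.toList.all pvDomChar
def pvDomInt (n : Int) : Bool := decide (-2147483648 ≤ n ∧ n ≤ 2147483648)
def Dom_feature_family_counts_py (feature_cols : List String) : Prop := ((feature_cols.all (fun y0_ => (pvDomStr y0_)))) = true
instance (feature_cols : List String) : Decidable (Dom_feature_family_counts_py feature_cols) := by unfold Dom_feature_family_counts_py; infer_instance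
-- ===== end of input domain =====

-- B replaces A's three independent scans of feature_cols by one loop that classifies
-- each name once into three disjoint-prefix counters (objective: simpler).

-- shared predicate: the tuple-startswith test both Pythons perform
def isMC (s : String) : Bool :=
  PySem.Str.startswith s "mc_" || PySem.Str.startswith s "jd_" || PySem.Str.startswith s "rs_"

-- ===== PORT A =====
def feature_family_counts_py (feature_cols : List String) : List (String × Int) :=
  let mc_count : Int := feature_cols.foldl (fun acc c => if isMC c then acc + 1 else acc) 0
  let pade_count : Int := feature_cols.foldl (fun acc c => if PySem.Str.startswith c "pade_" then acc + 1 else acc) 0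
  let path_shape_count : Int := feature_cols.foldl (fun acc c => if PySem.Str.startswith c "ps_" then acc + 1 else acc) 0
  [("feature_count", (feature_cols.length : Int)),
   ("mc_feature_count", mc_count),
   ("pade_feature_count", pade_count),
   ("path_shape_feature_count", path_shape_count)]

-- ===== PORT B =====
-- the single loop of Source B, carrying the three counters
def altLoop : List String → Int → Int → Int → Int × Int × Int
  | [], mc, pade, path => (mc, pade, path)
  | c :: rest, mc, pade, path =>
    if isMC c then altLoop rest (mc + 1) pade path
    else if PySem.Str.startswith c "pade_" then altLoop rest mc (pade + 1) path
    else if PySem.Str.startswith c "ps_" then altLoop rest mc pade (path + 1)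
    else altLoop rest mc pade path

def feature_family_counts_py_alt (feature_cols : List String) : List (String × Int) :=
  let r := altLoop feature_cols 0 0 0
  [("feature_count", (feature_cols.length : Int)),
   ("mc_feature_count", r.1),
   ("pade_feature_count", r.2.1),
   ("path_shape_feature_count", r.2.2)]

-- ===== PRECONDITION & SPEC =====
def Spec_feature_family_counts_py (feature_cols : List String) (out : List (String × Int)) : Prop := out = feature_family_counts_py_alt feature_cols
instance (feature_cols : List String) (out : List (String × Int)) : Decidable (Spec_feature_family_counts_py feature_cols out) := by unfold Spec_feature_family_counts_py; infer_instance

-- ===== CLAIM (what is proved, stated in full; the proofs are below) =====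
def Claim_equal_feature_family_counts_py : Prop := ∀ (feature_cols : List String), Dom_feature_family_counts_py feature_cols → Spec_feature_family_counts_py feature_cols (feature_family_counts_py feature_cols)

-- ===== LEMMAS AND PROOFS =====

theorem pref_get (s p : List Char) (h : p <+: s) (i : Nat) (hi : i < p.length) :
    s[i]? = p[i]? := by
  obtain ⟨t, rfl⟩ := h
  rw [List.getElem?_append_left hi]

theorem sw_str_get (s p : String) (h : PySem.Str.startswith s p = true) (i : Nat)
    (hi : i < p.toList.length) : s.toList[i]? = p.toList[i]? := by
  have hc : PySem.Chars.startswith s.toList p.toList = true := by simpa using h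
  exact pref_get _ _ ((PySem.Chars.startswith_iff _ _).mp hc) i hi

-- if s and p disagree at a position inside p, s does not start with p
theorem sw_false_of_get (s p : String) (i : Nat) (a : Char) (hlen : i < p.toList.length)
    (h0 : s.toList[i]? = some a) (hne : p.toList[i]? ≠ some a) :
    PySem.Str.startswith s p = false := by
  cases hb : PySem.Str.startswith s p with
  | false => rfl
  | true =>
    have h := sw_str_get s p hb i hlen
    rw [h0] at h
    exact absurd h.symm hne

theorem mc_false_of_head_p (s : String) (h0 : s.toList[0]? = some 'p') : isMC s = false := by
  unfold isMC
  rw [sw_false_of_get s "mc_" 0 'p' (by decide) h0 (by decide),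
      sw_false_of_get s "jd_" 0 'p' (by decide) h0 (by decide),
      sw_false_of_get s "rs_" 0 'p' (by decide) h0 (by decide)]
  rfl

theorem mc_false_of_pade (s : String) (h : PySem.Str.startswith s "pade_" = true) :
    isMC s = false := by
  apply mc_false_of_head_p
  rw [sw_str_get s "pade_" h 0 (by decide)]; decide

theorem mc_false_of_ps (s : String) (h : PySem.Str.startswith s "ps_" = true) :
    isMC s = false := by
  apply mc_false_of_head_p
  rw [sw_str_get s "ps_" h 0 (by decide)]; decide

theorem pade_false_of_ps (s : String) (h : PySem.Str.startswith s "ps_" = true) :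
    PySem.Str.startswith s "pade_" = false := by
  have h1 : s.toList[1]? = some 's' := by
    rw [sw_str_get s "ps_" h 1 (by decide)]; decide
  exact sw_false_of_get s "pade_" 1 's' (by decide) h1 (by decide)

theorem altLoop_eq (fc : List String) : ∀ (mc pade path : Int),
    altLoop fc mc pade path =
      (fc.foldl (fun acc c => if isMC c then acc + 1 else acc) mc,
       fc.foldl (fun acc c => if PySem.Str.startswith c "pade_" then acc + 1 else acc) pade,
       fc.foldl (fun acc c => if PySem.Str.startswith c "ps_" then acc + 1 else acc) path) := by
  induction fc with
  | nil => intro mc pade path; simp only [altLoop, List.foldl_nil]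
  | cons c rest ih =>
    intro mc pade path
    simp only [altLoop, List.foldl_cons]
    by_cases h1 : isMC c = true
    · have h2 : PySem.Str.startswith c "pade_" = false := by
        cases hb : PySem.Str.startswith c "pade_" with
        | false => rfl
        | true => rw [mc_false_of_pade c hb] at h1; exact absurd h1 (by decide)
      have h3 : PySem.Str.startswith c "ps_" = false := by
        cases hb : PySem.Str.startswith c "ps_" with
        | false => rfl
        | true => rw [mc_false_of_ps c hb] at h1; exact absurd h1 (by decide)
      rw [h1, h2, h3]
      simp only [if_true, Bool.false_eq_true, if_false, ih]
    · have h1' : isMC c = false := Bool.eq_false_iff.mpr h1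
      rw [h1']
      by_cases h2 : PySem.Str.startswith c "pade_" = true
      · have h3 : PySem.Str.startswith c "ps_" = false := by
          cases hb : PySem.Str.startswith c "ps_" with
          | false => rfl
          | true => exact absurd h2 (by rw [pade_false_of_ps c hb]; decide)
        rw [h2, h3]
        simp only [if_true, Bool.false_eq_true, if_false, ih]
      · have h2' : PySem.Str.startswith c "pade_" = false := Bool.eq_false_iff.mpr h2
        rw [h2']
        by_cases h3 : PySem.Str.startswith c "ps_" = true
        · rw [h3]
          simp only [if_true, Bool.false_eq_true, if_false, ih]
        · rw [Bool.eq_false_iff.mpr h3]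
          simp only [Bool.false_eq_true, if_false, ih]

-- ===== VERDICT (by name: the statement is the Claim_ definition above) =====
theorem feature_family_counts_py_spec : Claim_equal_feature_family_counts_py := by
  intro fc _
  unfold Spec_feature_family_counts_py feature_family_counts_py feature_family_counts_py_alt
  rw [altLoop_eq]
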